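-- pv_equiv track=rewrite | github.com/mike235711/python_chess_bit_engine | utils.py | generate_bishop_unfull_rays
-- ===== SOURCE A (Python) =====
-- def generate_bishop_unfull_rays(square):
--     '''
--     Generating bishop rays that finish just before reaching the border.
--     '''
--     moves = 0
--     r, c = divmod(square, 8)
--     directions = [(1, 1), (1, -1), (-1, 1), (-1, -1)]  # diagonals
--     for dr, dc in directions:
--         nr, nc = r + dr, c + dc
--         while 0 < nr < 7 and 0 < nc < 7:
--             moves |= 1 << (nr * 8 + nc)
--             nr += dr
--             nc += dc
--     return moves
-- ===== SOURCE B (Python) =====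
-- # Bitboard flood-fill: push a single-bit board one diagonal step at a time,
-- # masking each step to the inner 6x6 region, instead of walking coordinates.
-- INNER = 0x007E7E7E7E7E7E00  # squares whose rank and file are both in 1..6
--
--
-- def generate_bishop_unfull_rays(square):
--     moves = 0
--     for step in (9, 7, -7, -9):
--         ray = 1 << square
--         for _ in range(6):
--             ray = (ray << step if step > 0 else ray >> -step) & INNER
--             moves |= ray
--     return moves
-- ===== Notes on version B (the rewrite author's own statement) =====
-- stated objective: alternative
-- what changed: Replaces the four coordinate ray walks with the classic bitboard flood-fill: a single-bit board is shifted one diagonal step at a time in each of the four directions and masked to the inner 6x6 region after every step; Pre_ restricts to non-negative square indices (the natural domain of a board square), since B's '1 << square' raises ValueError on negative input where A happens to return 0.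
-- outside the precondition, e.g. on generate_bishop_unfull_rays(-1): A returns 0, B raises ValueError
import Mathlib
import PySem

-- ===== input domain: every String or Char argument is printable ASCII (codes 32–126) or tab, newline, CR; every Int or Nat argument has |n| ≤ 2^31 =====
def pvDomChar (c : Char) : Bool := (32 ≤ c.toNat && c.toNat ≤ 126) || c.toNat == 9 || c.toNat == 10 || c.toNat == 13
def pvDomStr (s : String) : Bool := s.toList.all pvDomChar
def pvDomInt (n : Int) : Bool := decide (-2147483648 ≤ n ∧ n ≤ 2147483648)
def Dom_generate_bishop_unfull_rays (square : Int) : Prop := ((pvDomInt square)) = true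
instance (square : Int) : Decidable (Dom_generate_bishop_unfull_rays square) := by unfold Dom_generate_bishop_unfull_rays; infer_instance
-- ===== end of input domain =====

-- B replaces the four coordinate ray walks with a bitboard flood-fill: a single-bit
-- board is pushed one diagonal step at a time and masked to the inner 6x6 region
-- (objective: alternative; same cost). Pre_ restricts to non-negative square indices,
-- the natural domain of a board square: on negative squares B's '1 << square' raises.


-- ===== PORT A =====
-- the 'while 0 < nr < 7 and 0 < nc < 7' loop; nr moves by ±1 each step and stays in
-- an interval of width 6 while looping, so fuel 8 is never exhausted
def pvWalkA (dr dc : Int) : Nat → Int → Int → Int → Int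
  | 0, _, _, moves => moves
  | fuel + 1, nr, nc, moves =>
    if 0 < nr ∧ nr < 7 ∧ 0 < nc ∧ nc < 7 then
      pvWalkA dr dc fuel (nr + dr) (nc + dc)
        (PySem.Int.bor moves ((1 : Int) <<< (nr * 8 + nc).toNat))
    else moves

def generate_bishop_unfull_rays (square : Int) : Int :=
  let r := PySem.Int.floordiv square 8
  let c := PySem.Int.mod square 8
  let directions : List (Int × Int) := [(1, 1), (1, -1), (-1, 1), (-1, -1)]
  directions.foldl (fun moves (d : Int × Int) =>
    pvWalkA d.1 d.2 8 (r + d.1) (c + d.2) moves) 0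

-- ===== PORT B =====
def pvInner : Int := 0x007E7E7E7E7E7E00  -- squares with rank and file both in 1..6

-- the 'for _ in range(6)' loop, counted down; state = (ray, moves)
def pvFillLoop (step : Int) : Nat → Int → Int → Int
  | 0, _, moves => moves
  | k + 1, ray, moves =>
    let ray' := PySem.Int.band
      (if 0 < step then ray <<< step.toNat else ray >>> (-step).toNat) pvInner
    pvFillLoop step k ray' (PySem.Int.bor moves ray')

def generate_bishop_unfull_rays_alt (square : Int) : Int :=
  ([9, 7, -7, -9] : List Int).foldl
    (fun moves step => pvFillLoop step 6 ((1 : Int) <<< square.toNat) moves) 0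

-- ===== PRECONDITION & SPEC =====
-- Pre_ excludes negative square indices (not board squares): there B's '1 << square'
-- raises ValueError while A happens to return 0.
def Pre_generate_bishop_unfull_rays (square : Int) : Prop := 0 ≤ square
instance (square : Int) : Decidable (Pre_generate_bishop_unfull_rays square) := by unfold Pre_generate_bishop_unfull_rays; infer_instance
def pvWitness_generate_bishop_unfull_rays : Int := 27

def Spec_generate_bishop_unfull_rays (square : Int) (out : Int) : Prop := out = generate_bishop_unfull_rays_alt square
instance (square : Int) (out : Int) : Decidable (Spec_generate_bishop_unfull_rays square out) := by unfold Spec_generate_bishop_unfull_rays; infer_instance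

-- ===== CLAIM (what is proved, stated in full; the proofs are below) =====
def Claim_equal_generate_bishop_unfull_rays : Prop := ∀ (square : Int), Dom_generate_bishop_unfull_rays square → Pre_generate_bishop_unfull_rays square → Spec_generate_bishop_unfull_rays square (generate_bishop_unfull_rays square)

-- ===== LEMMAS AND PROOFS =====

-- a walk whose very first cell fails the board-interior test contributes nothing
lemma pvWalkA_stop (dr dc nr nc m : Int)
    (h : ¬(0 < nr ∧ nr < 7 ∧ 0 < nc ∧ nc < 7)) :
    pvWalkA dr dc 8 nr nc m = m := by
  show pvWalkA dr dc (7 + 1) nr nc m = m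
  rw [pvWalkA, if_neg h]

lemma pv_bor_zero (m : Int) : PySem.Int.bor m 0 = m := by
  unfold PySem.Int.bor
  split_ifs with h h0 h0 <;> simp_all

lemma pv_band_pow_inner (n : Nat) (h : 55 ≤ n) :
    PySem.Int.band ((2 : Int) ^ n) pvInner = 0 := by
  have h2 : ((2 : Int) ^ n) = ((2 ^ n : Nat) : Int) := by push_cast; ring
  unfold PySem.Int.band pvInner
  rw [if_pos (by positivity), if_pos (by norm_num), h2, Int.toNat_natCast]
  have hkey : (2 ^ n : Nat) &&& (35604928818740736 : Nat) = 0 := by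
    apply Nat.eq_of_testBit_eq
    intro i
    rw [Nat.testBit_and, Nat.zero_testBit]
    by_cases hi : i = n
    · subst hi
      have hf : Nat.testBit (35604928818740736 : Nat) i = false := by
        apply Nat.testBit_lt_two_pow
        calc (35604928818740736 : Nat) < 2 ^ 55 := by norm_num
          _ ≤ 2 ^ i := Nat.pow_le_pow_right (by norm_num) h
      simp [hf]
    · simp [Nat.testBit_two_pow_of_ne (fun he => hi he.symm)]
  rw [show (Int.toNat 0x007E7E7E7E7E7E00) = (35604928818740736 : Nat) from rfl, hkey]
  rfl

lemma pvFillLoop_zero (step : Int) (k : Nat) (m : Int) :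
    pvFillLoop step k 0 m = m := by
  induction k generalizing m with
  | zero => rfl
  | succ k ih =>
    have hz : ((if 0 < step then (0 : Int) <<< step.toNat else (0 : Int) >>> (-step).toNat)) = 0 := by
      split_ifs <;> simp [Int.shiftLeft_eq, Int.shiftRight_eq_div_pow]
    rw [pvFillLoop]
    simp only [hz]
    have hb : PySem.Int.band 0 pvInner = 0 := by decide
    rw [hb, ih, pv_bor_zero]

-- pushing a bit that sits at index ≥ 64 (an off-board square) never meets the inner mask
lemma pvFillLoop_large (step : Int)
    (hs : step = 9 ∨ step = 7 ∨ step = -7 ∨ step = -9)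
    (n : Nat) (hn : 64 ≤ n) (m : Int) :
    pvFillLoop step 6 ((1 : Int) <<< n) m = m := by
  have h1 : ((1 : Int) <<< n) = (2 : Int) ^ n := by rw [Int.shiftLeft_eq, one_mul]
  have hray : PySem.Int.band
      (if 0 < step then ((1 : Int) <<< n) <<< step.toNat else ((1 : Int) <<< n) >>> (-step).toNat)
      pvInner = 0 := by
    rcases hs with rfl | rfl | rfl | rfl
    · rw [if_pos (by norm_num), h1]
      have : ((2 : Int) ^ n) <<< (Int.toNat 9) = (2 : Int) ^ (n + 9) := by
        rw [Int.shiftLeft_eq, ← pow_add]; rfl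
      rw [this]; exact pv_band_pow_inner _ (by omega)
    · rw [if_pos (by norm_num), h1]
      have : ((2 : Int) ^ n) <<< (Int.toNat 7) = (2 : Int) ^ (n + 7) := by
        rw [Int.shiftLeft_eq, ← pow_add]; rfl
      rw [this]; exact pv_band_pow_inner _ (by omega)
    · rw [if_neg (by norm_num), h1]
      have : ((2 : Int) ^ n) >>> (Int.toNat (-(-7 : Int))) = (2 : Int) ^ (n - 7) := by
        rw [Int.shiftRight_eq_div_pow]
        show ((2 : Int) ^ n) / ((2 ^ 7 : Nat) : Int) = _
        rw [show n = (n - 7) + 7 by omega, pow_add]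
        push_cast
        rw [Int.mul_ediv_cancel _ (by positivity)]
      rw [this]; exact pv_band_pow_inner _ (by omega)
    · rw [if_neg (by norm_num), h1]
      have : ((2 : Int) ^ n) >>> (Int.toNat (-(-9 : Int))) = (2 : Int) ^ (n - 9) := by
        rw [Int.shiftRight_eq_div_pow]
        show ((2 : Int) ^ n) / ((2 ^ 9 : Nat) : Int) = _
        rw [show n = (n - 9) + 9 by omega, pow_add]
        push_cast
        rw [Int.mul_ediv_cancel _ (by positivity)]
      rw [this]; exact pv_band_pow_inner _ (by omega)
  rw [pvFillLoop]
  simp only [hray]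
  rw [pvFillLoop_zero, pv_bor_zero]

-- ===== VERDICT (by name: the statement is the Claim_ definition above) =====
theorem generate_bishop_unfull_rays_spec : Claim_equal_generate_bishop_unfull_rays := by
  intro square _ hpre
  unfold Spec_generate_bishop_unfull_rays
  by_cases h : square < 64
  · have h0 : 0 ≤ square := hpre
    interval_cases square <;> decide
  · -- off the board above rank 7: both sides produce 0
    unfold generate_bishop_unfull_rays generate_bishop_unfull_rays_alt
    have hfd : PySem.Int.floordiv square 8 = square / 8 :=
      PySem.Int.floordiv_eq_ediv_of_pos (by omega)
    have hr : 7 < square / 8 := by omega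
    simp only [hfd, List.foldl]
    rw [pvWalkA_stop _ _ _ _ _ (by omega), pvWalkA_stop _ _ _ _ _ (by omega),
        pvWalkA_stop _ _ _ _ _ (by omega), pvWalkA_stop _ _ _ _ _ (by omega)]
    rw [pvFillLoop_large _ (by norm_num) _ (by omega),
        pvFillLoop_large _ (by norm_num) _ (by omega),
        pvFillLoop_large _ (by norm_num) _ (by omega),
        pvFillLoop_large _ (by norm_num) _ (by omega)]
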